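-- pv_equiv track=rewrite | github.com/Hiddenworld26/portfolio | bit.py | unspiral_order
-- ===== SOURCE A (Python) =====
-- def unspiral_order(matrix, spiral_order):
--     """
--     Restore the original matrix from the spiral order.
--     """
--     if not matrix:
--         return []
--
--     rows, cols = len(matrix), len(matrix[0])
--     result = [[0] * cols for _ in range(rows)]
--
--     top, bottom = 0, rows - 1
--     left, right = 0, cols - 1
--
--     idx = 0
--     while top <= bottom and left <= right:
--         # Fill top row
--         for col in range(left, right + 1):
--             result[top][col] = spiral_order[idx]
--             idx += 1
--         top += 1
--
--         # Fill right column
--         for row in range(top, bottom + 1):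
--             result[row][right] = spiral_order[idx]
--             idx += 1
--         right -= 1
--
--         # Fill bottom row
--         if top <= bottom:
--             for col in range(right, left - 1, -1):
--                 result[bottom][col] = spiral_order[idx]
--                 idx += 1
--             bottom -= 1
--
--         # Fill left column
--         if left <= right:
--             for row in range(bottom, top - 1, -1):
--                 result[row][left] = spiral_order[idx]
--                 idx += 1
--             left += 1
--
--     return result
-- ===== SOURCE B (Python) =====
-- def unspiral_order(matrix, spiral_order):
--     """
--     Restore the original matrix from the spiral order.
--     """
--     if not matrix:
--         return []
--
--     rows, cols = len(matrix), len(matrix[0])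
--
--     # Walk the spiral as runs of precomputed lengths: cols, rows-1, cols-1, rows-2, ...
--     # collecting position -> value into a dict, then build the grid by comprehension.
--     values = {}
--     deltas = [(0, 1), (1, 0), (0, -1), (-1, 0)]
--     lens = [cols, rows - 1]
--     r, c, d, idx = 0, -1, 0, 0
--     while lens[d % 2] > 0:
--         dr, dc = deltas[d % 4]
--         for _ in range(lens[d % 2]):
--             r += dr
--             c += dc
--             values[(r, c)] = spiral_order[idx]
--             idx += 1
--         lens[d % 2] -= 1
--         d += 1
--
--     return [[values[(i, j)] for j in range(cols)] for i in range(rows)]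
-- ===== Notes on version B (the rewrite author's own statement) =====
-- stated objective: alternative
-- what changed: A refills the grid ring by ring with four shrinking boundary pointers mutating a preallocated matrix; B instead walks the spiral as straight runs of precomputed lengths (cols, rows-1, cols-1, rows-2, ...) collecting a position-to-value dict and then builds the matrix by a comprehension over that dict.
import Mathlib
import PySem

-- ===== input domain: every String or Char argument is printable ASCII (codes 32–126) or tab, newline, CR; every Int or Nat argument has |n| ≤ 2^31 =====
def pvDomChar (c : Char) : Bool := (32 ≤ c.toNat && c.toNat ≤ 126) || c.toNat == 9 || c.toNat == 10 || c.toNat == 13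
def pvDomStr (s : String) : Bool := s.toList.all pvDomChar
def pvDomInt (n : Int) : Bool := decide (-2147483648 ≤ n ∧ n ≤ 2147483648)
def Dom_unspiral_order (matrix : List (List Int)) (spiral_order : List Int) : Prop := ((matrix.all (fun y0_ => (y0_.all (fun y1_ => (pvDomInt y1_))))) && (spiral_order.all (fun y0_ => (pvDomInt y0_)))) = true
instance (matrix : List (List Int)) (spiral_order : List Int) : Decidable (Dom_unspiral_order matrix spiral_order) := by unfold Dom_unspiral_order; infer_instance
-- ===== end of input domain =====

-- B rebuilds the matrix by walking the spiral as runs of precomputed lengths (cols, rows-1,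
-- cols-1, rows-2, …) into a position→value dict and reading the grid off by comprehension,
-- instead of A's four shrinking boundaries mutating a grid in place (objective: alternative).

-- ===== PORT A =====

-- spiral_order[idx]: idx is in range under Pre_; getD totalizes
def pvSG (s : List Int) (i : Int) : Int := (PySem.List.pyGet? s i).getD 0

-- result[r][c] = v.  In every reachable state of A the indices are in range (0 ≤ r < rows,
-- 0 ≤ c < cols), so the 0 ≤ guard merely totalizes: Python's negative wraparound is unreachable.
def pvSetCell (g : List (List Int)) (r c : Int) (v : Int) : List (List Int) :=
  if 0 ≤ r ∧ 0 ≤ c then g.modify r.toNat (fun row => row.set c.toNat v) else g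

-- one of A's four 'for' loops: write spiral_order[idx] at (pos i) for i over the range, idx += 1
def pvFill (s : List Int) (pos : Int → Int × Int) (ix : List Int)
    (st : List (List Int) × Int) : List (List Int) × Int :=
  ix.foldl (fun st i => (pvSetCell st.1 (pos i).1 (pos i).2 (pvSG s st.2), st.2 + 1)) st

-- termination helpers for the loop ports (cited by name in decreasing_by)
theorem pvSndOr {α : Type} {c : Prop} [Decidable c] (x y : α × Int) :
    (if _ : c then x else y).2 = x.2 ∨ (if _ : c then x else y).2 = y.2 := by
  by_cases h : c
  · exact Or.inl (by rw [dif_pos h])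
  · exact Or.inr (by rw [dif_neg h])

theorem pvDecA_helper (t b l r b' l' : Int) (ht : t ≤ b ∧ l ≤ r)
    (hb : b' = b - 1 ∨ b' = b) (hl : l' = l + 1 ∨ l' = l) :
    ((b' - (t + 1)) + ((r - 1) - l') + 2).toNat < ((b - t) + (r - l) + 2).toNat := by
  obtain ⟨h1, h2⟩ := ht
  rcases hb with rfl | rfl <;> rcases hl with rfl | rfl <;> omega

theorem pvIte3 {c : Prop} [Decidable c] (h v : Int) :
    ((if _ : c then h else v) = h ∧ (if _ : c then h - 1 else h) = h - 1 ∧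
      (if _ : c then v else v - 1) = v)
    ∨ ((if _ : c then h else v) = v ∧ (if _ : c then h - 1 else h) = h ∧
      (if _ : c then v else v - 1) = v - 1) := by
  by_cases hc : c
  · exact Or.inl (by rw [dif_pos hc, dif_pos hc, dif_pos hc]; exact ⟨rfl, rfl, rfl⟩)
  · exact Or.inr (by rw [dif_neg hc, dif_neg hc, dif_neg hc]; exact ⟨rfl, rfl, rfl⟩)

theorem pvDecB_helper (h v len h' v' : Int)
    (hlen : (len = h ∧ h' = h - 1 ∧ v' = v) ∨ (len = v ∧ h' = h ∧ v' = v - 1))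
    (hl : 0 < len) : h'.toNat + v'.toNat < h.toNat + v.toNat := by
  rcases hlen with ⟨rfl, rfl, rfl⟩ | ⟨rfl, rfl, rfl⟩ <;> omega

-- A's while loop over the boundaries top/bottom/left/right
def pvLoopA (s : List Int) (t b l r : Int) (g : List (List Int)) (idx : Int) :
    List (List Int) :=
  if ht : t ≤ b ∧ l ≤ r then
    let st1 := pvFill s (fun col => (t, col)) (PySem.List.pyRange l (r+1) 1) (g, idx)
    let st2 := pvFill s (fun row => (row, r)) (PySem.List.pyRange (t+1) (b+1) 1) st1
    let q3 : (List (List Int) × Int) × Int :=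
      if t+1 ≤ b then (pvFill s (fun col => (b, col)) (PySem.List.pyRange (r-1) (l-1) (-1)) st2, b-1)
      else (st2, b)
    let q4 : (List (List Int) × Int) × Int :=
      if l ≤ r-1 then (pvFill s (fun row => (row, l)) (PySem.List.pyRange q3.2 ((t+1)-1) (-1)) q3.1, l+1)
      else (q3.1, l)
    pvLoopA s (t+1) q3.2 q4.2 (r-1) q4.1.1 q4.1.2
  else g
termination_by ((b - t) + (r - l) + 2).toNat
decreasing_by
  exact pvDecA_helper t b l r _ _ ht (pvSndOr _ _) (pvSndOr _ _)

def unspiral_order (matrix : List (List Int)) (spiral_order : List Int) : List (List Int) :=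
  if matrix = [] then []
  else
    let rows : Int := matrix.length
    let cols : Int := (PySem.List.pyGetD matrix 0 []).length
    let result := (List.range rows.toNat).map (fun _ => List.replicate cols.toNat (0:Int))
    pvLoopA spiral_order 0 (rows - 1) 0 (cols - 1) result 0

-- ===== PORT B =====

def pvDeltas : List (Int × Int) := [(0,1),(1,0),(0,-1),(-1,0)]

-- B's inner 'for _ in range(len)': step (r,c) by (dr,dc), record value, idx += 1
def pvRun (s : List Int) (dr dc : Int) (n : Nat)
    (st : Int × Int × PySem.Dict (Int × Int) Int × Int) :
    Int × Int × PySem.Dict (Int × Int) Int × Int :=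
  (List.range n).foldl
    (fun st _ =>
      ((st.1 + dr, st.2.1 + dc,
        st.2.2.1.insert (st.1 + dr, st.2.1 + dc) (pvSG s st.2.2.2), st.2.2.2 + 1)))
    st

-- B's while loop: h, v are lens[0], lens[1]
def pvLoopB (s : List Int) (h v : Int) (d : Nat) (r c : Int)
    (values : PySem.Dict (Int × Int) Int) (idx : Int) : PySem.Dict (Int × Int) Int :=
  let len := if d % 2 = 0 then h else v
  if hl : 0 < len then
    let δ := (PySem.List.pyGet? pvDeltas ((d % 4 : Nat) : Int)).getD (0, 0)
    let st := pvRun s δ.1 δ.2 len.toNat (r, c, values, idx)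
    pvLoopB s (if d % 2 = 0 then h - 1 else h) (if d % 2 = 0 then v else v - 1) (d+1)
      st.1 st.2.1 st.2.2.1 st.2.2.2
  else values
termination_by h.toNat + v.toNat
decreasing_by
  exact pvDecB_helper h v _ _ _ (pvIte3 h v) hl

def unspiral_order_alt (matrix : List (List Int)) (spiral_order : List Int) : List (List Int) :=
  if matrix = [] then []
  else
    let rows : Int := matrix.length
    let cols : Int := (PySem.List.pyGetD matrix 0 []).length
    let values := pvLoopB spiral_order cols (rows - 1) 0 0 (-1) PySem.Dict.empty 0
    (List.range rows.toNat).map (fun i : Nat =>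
      (List.range cols.toNat).map (fun j : Nat => values.getD ((i:Int), (j:Int)) 0))

-- ===== PRECONDITION & SPEC =====
-- Pre_ excludes only the inputs on which Python A raises IndexError: a nonempty matrix whose
-- spiral_order has fewer than rows*cols elements (A reads exactly rows*cols of them).
def Pre_unspiral_order (matrix : List (List Int)) (spiral_order : List Int) : Prop :=
  matrix = [] ∨ matrix.length * (matrix.headD []).length ≤ spiral_order.length
instance (matrix : List (List Int)) (spiral_order : List Int) :
    Decidable (Pre_unspiral_order matrix spiral_order) := by
  unfold Pre_unspiral_order; infer_instance

def pvWitness_unspiral_order : List (List Int) × List Int := ([[0, 0], [0, 0]], [1, 2, 3, 4])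

def Spec_unspiral_order (matrix : List (List Int)) (spiral_order : List Int) (out : List (List Int)) : Prop := out = unspiral_order_alt matrix spiral_order
instance (matrix : List (List Int)) (spiral_order : List Int) (out : List (List Int)) : Decidable (Spec_unspiral_order matrix spiral_order out) := by unfold Spec_unspiral_order; infer_instance

-- ===== CLAIM (what is proved, stated in full; the proofs are below) =====
def Claim_equal_unspiral_order : Prop := ∀ (matrix : List (List Int)) (spiral_order : List Int), Dom_unspiral_order matrix spiral_order → Pre_unspiral_order matrix spiral_order → Spec_unspiral_order matrix spiral_order (unspiral_order matrix spiral_order)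

-- ===== LEMMAS AND PROOFS =====

-- apply the writes at a list of positions, values taken from s starting at index i
def pvApplyW (s : List Int) : List (Int × Int) → Int → List (List Int) → List (List Int)
  | [], _, g => g
  | p :: ps, i, g => pvApplyW s ps (i+1) (pvSetCell g p.1 p.2 (pvSG s i))

-- the same writes, into a dict
def pvDictW (s : List Int) : List (Int × Int) → Int → PySem.Dict (Int × Int) Int →
    PySem.Dict (Int × Int) Int
  | [], _, d => d
  | p :: ps, i, d => pvDictW s ps (i+1) (d.insert p (pvSG s i))

def pvGridOf (rows cols : Nat) (d : PySem.Dict (Int × Int) Int) : List (List Int) :=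
  (List.range rows).map (fun i : Nat =>
    (List.range cols).map (fun j : Nat => d.getD ((i:Int), (j:Int)) 0))

-- positions of one straight run of n steps from (r,c) in direction (dr,dc)
def pvSeg (dr dc : Int) (n : Nat) (r c : Int) : List (Int × Int) :=
  (List.range n).map (fun k : Nat => (r + ((k:Int)+1)*dr, c + ((k:Int)+1)*dc))

-- the positions A writes, ring by ring
def pvPosA (t b l r : Int) : List (Int × Int) :=
  if _ht : t ≤ b ∧ l ≤ r then
    let p1 := (PySem.List.pyRange l (r+1) 1).map (fun col => (t, col))
    let p2 := (PySem.List.pyRange (t+1) (b+1) 1).map (fun row => (row, r))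
    let q3 : List (Int × Int) × Int :=
      if t+1 ≤ b then ((PySem.List.pyRange (r-1) (l-1) (-1)).map (fun col => (b, col)), b-1)
      else ([], b)
    let q4 : List (Int × Int) × Int :=
      if l ≤ r-1 then ((PySem.List.pyRange q3.2 ((t+1)-1) (-1)).map (fun row => (row, l)), l+1)
      else ([], l)
    p1 ++ p2 ++ q3.1 ++ q4.1 ++ pvPosA (t+1) q3.2 q4.2 (r-1)
  else []
termination_by ((b - t) + (r - l) + 2).toNat
decreasing_by
  exact pvDecA_helper t b l r _ _ _ht (pvSndOr _ _) (pvSndOr _ _)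

-- the positions B writes, run by run
def pvPosB (h v : Int) (d : Nat) (r c : Int) : List (Int × Int) :=
  let len := if d % 2 = 0 then h else v
  if 0 < len then
    let δ := (PySem.List.pyGet? pvDeltas ((d % 4 : Nat) : Int)).getD (0, 0)
    pvSeg δ.1 δ.2 len.toNat r c ++
      pvPosB (if d % 2 = 0 then h - 1 else h) (if d % 2 = 0 then v else v - 1) (d+1)
        (r + len*δ.1) (c + len*δ.2)
  else []
termination_by h.toNat + v.toNat
decreasing_by
  rename_i hl
  exact pvDecB_helper h v _ _ _ (pvIte3 h v) hl

theorem pvApplyW_append (s : List Int) (ps qs : List (Int × Int)) :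
    ∀ (i : Int) (g : List (List Int)),
    pvApplyW s (ps ++ qs) i g = pvApplyW s qs (i + ps.length) (pvApplyW s ps i g) := by
  induction ps with
  | nil => intro i g; simp [pvApplyW]
  | cons p ps ih =>
      intro i g
      simp only [List.cons_append, pvApplyW, ih, List.length_cons]
      congr 1
      push_cast; ring

theorem pvDictW_append (s : List Int) (ps qs : List (Int × Int)) :
    ∀ (i : Int) (d : PySem.Dict (Int × Int) Int),
    pvDictW s (ps ++ qs) i d = pvDictW s qs (i + ps.length) (pvDictW s ps i d) := by
  induction ps with
  | nil => intro i d; simp [pvDictW]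
  | cons p ps ih =>
      intro i d
      simp only [List.cons_append, pvDictW, ih, List.length_cons]
      congr 1
      push_cast; ring

theorem pvFill_eq (s : List Int) (pos : Int → Int × Int) (ix : List Int) :
    ∀ (g : List (List Int)) (i : Int),
    pvFill s pos ix (g, i) = (pvApplyW s (ix.map pos) i g, i + ix.length) := by
  induction ix with
  | nil => intro g i; simp [pvFill, pvApplyW]
  | cons x ix ih =>
      intro g i
      simp only [pvFill, List.foldl_cons, List.map_cons, pvApplyW, List.length_cons] at *
      rw [ih]
      congr 1
      push_cast; ring

theorem pvSeg_succ (dr dc : Int) (n : Nat) (r c : Int) :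
    pvSeg dr dc (n+1) r c =
      pvSeg dr dc n r c ++ [(r + ((n:Int)+1)*dr, c + ((n:Int)+1)*dc)] := by
  unfold pvSeg
  rw [List.range_succ, List.map_append]
  simp

theorem pvSeg_length (dr dc : Int) (n : Nat) (r c : Int) :
    (pvSeg dr dc n r c).length = n := by
  simp [pvSeg]

theorem pvRun_eq (s : List Int) (dr dc : Int) (n : Nat) :
    ∀ (r c : Int) (d : PySem.Dict (Int × Int) Int) (i : Int),
    pvRun s dr dc n (r, c, d, i) =
      (r + (n:Int)*dr, c + (n:Int)*dc, pvDictW s (pvSeg dr dc n r c) i d, i + n) := by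
  induction n with
  | zero => intro r c d i; simp [pvRun, pvSeg, pvDictW]
  | succ n ih =>
      intro r c d i
      have step : pvRun s dr dc (n+1) (r, c, d, i) =
          (fun (st : Int × Int × PySem.Dict (Int × Int) Int × Int) =>
            ((st.1 + dr, st.2.1 + dc,
              st.2.2.1.insert (st.1 + dr, st.2.1 + dc) (pvSG s st.2.2.2), st.2.2.2 + 1)))
            (pvRun s dr dc n (r, c, d, i)) := by
        unfold pvRun
        rw [List.range_succ, List.foldl_append]
        simp
      rw [step, ih]
      simp only [pvSeg_succ, pvDictW_append, pvSeg_length, pvDictW]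
      refine congrArg₂ _ (by push_cast; ring) (congrArg₂ _ (by push_cast; ring) (congrArg₂ _ ?_ (by push_cast; ring)))
      have h1 : r + (n:Int)*dr + dr = r + ((n:Int)+1)*dr := by ring
      have h2 : c + (n:Int)*dc + dc = c + ((n:Int)+1)*dc := by ring
      rw [h1, h2]

theorem pvFill_eq' (s : List Int) (pos : Int → Int × Int) (ix : List Int)
    (st : List (List Int) × Int) :
    pvFill s pos ix st = (pvApplyW s (ix.map pos) st.2 st.1, st.2 + ix.length) := by
  obtain ⟨g, i⟩ := st
  exact pvFill_eq s pos ix g i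

theorem pvLoopA_eq (s : List Int) (t0 b0 l0 r0 : Int) (g0 : List (List Int)) (i0 : Int) :
    pvLoopA s t0 b0 l0 r0 g0 i0 = pvApplyW s (pvPosA t0 b0 l0 r0) i0 g0 := by
  fun_induction pvLoopA s t0 b0 l0 r0 g0 i0 with
  | case1 t b l r g idx ht st1 st2 q3 q4 ih =>
      rw [pvPosA, dif_pos ht, ih]
      have e4 : q4 = (if l ≤ r-1 then
          (pvFill s (fun row => (row, l)) (PySem.List.pyRange q3.2 ((t+1)-1) (-1)) q3.1, l+1)
          else (q3.1, l)) := rfl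
      have e3 : q3 = (if t+1 ≤ b then
          (pvFill s (fun col => (b, col)) (PySem.List.pyRange (r-1) (l-1) (-1)) st2, b-1)
          else (st2, b)) := rfl
      have e2 : st2 = pvFill s (fun row => (row, r)) (PySem.List.pyRange (t+1) (b+1) 1) st1 := rfl
      have e1 : st1 = pvFill s (fun col => (t, col)) (PySem.List.pyRange l (r+1) 1) (g, idx) := rfl
      rw [e4, e3, e2, e1]
      split_ifs with h3 h4 h4 <;>
        simp only [pvFill_eq', pvApplyW_append, pvApplyW, List.length_map, List.length_nil, List.length_append] <;>
        try (congr 1 <;> push_cast <;> ring)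
  | case2 t b l r g idx hne =>
      rw [pvPosA, dif_neg hne]
      rfl

theorem pvRun_eq' (s : List Int) (dr dc : Int) (n : Nat)
    (st : Int × Int × PySem.Dict (Int × Int) Int × Int) :
    pvRun s dr dc n st =
      (st.1 + (n:Int)*dr, st.2.1 + (n:Int)*dc,
       pvDictW s (pvSeg dr dc n st.1 st.2.1) st.2.2.2 st.2.2.1, st.2.2.2 + n) := by
  obtain ⟨r, c, d, i⟩ := st
  exact pvRun_eq s dr dc n r c d i

theorem pvLoopB_eq (s : List Int) (h0 v0 : Int) (d0 : Nat) (r0 c0 : Int)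
    (w0 : PySem.Dict (Int × Int) Int) (i0 : Int) :
    pvLoopB s h0 v0 d0 r0 c0 w0 i0 = pvDictW s (pvPosB h0 v0 d0 r0 c0) i0 w0 := by
  fun_induction pvLoopB s h0 v0 d0 r0 c0 w0 i0 with
  | case1 h v d r c values idx len hl δ st ih =>
      rw [pvPosB]
      have hl' : 0 < (if d % 2 = 0 then h else v) := hl
      rw [if_pos hl']
      refine ih.trans ?_
      have est : st = pvRun s δ.1 δ.2 (if d % 2 = 0 then h else v).toNat (r, c, values, idx) := rfl
      have eδ : δ = (PySem.List.pyGet? pvDeltas ((d % 4 : Nat) : Int)).getD (0, 0) := rfl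
      rw [est, pvRun_eq', eδ]
      have hn : (((if d % 2 = 0 then h else v).toNat : Int)) = (if d % 2 = 0 then h else v) :=
        Int.toNat_of_nonneg hl'.le
      rw [pvDictW_append, pvSeg_length]
      clear hn
      by_cases hd : d % 2 = 0 <;>
        simp only [hd, dite_true, dite_false, ite_true, ite_false] at hl' ⊢
      · rw [show ((h.toNat : Int)) = h from Int.toNat_of_nonneg hl'.le]
      · rw [show ((v.toNat : Int)) = v from Int.toNat_of_nonneg hl'.le]
  | case2 h v d r c values idx len hl =>
      rw [pvPosB]
      have hl' : ¬ 0 < (if d % 2 = 0 then h else v) := hl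
      rw [if_neg hl']
      rfl

theorem pvGridOf_length (rows cols : Nat) (d : PySem.Dict (Int × Int) Int) :
    (pvGridOf rows cols d).length = rows := by
  simp [pvGridOf]

theorem pvGridOf_row_length (rows cols : Nat) (d : PySem.Dict (Int × Int) Int)
    (i : Nat) (h : i < (pvGridOf rows cols d).length) :
    ((pvGridOf rows cols d)[i]'h).length = cols := by
  simp [pvGridOf]

theorem pvGridOf_getElem (rows cols : Nat) (d : PySem.Dict (Int × Int) Int)
    (i j : Nat) (hi : i < rows) (hj : j < cols) :
    ((pvGridOf rows cols d)[i]'(by simp [pvGridOf, hi]))[j]'(by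
      rw [pvGridOf_row_length]; exact hj) = d.getD ((i:Int), (j:Int)) 0 := by
  simp [pvGridOf]

theorem pvSetCell_gridOf (rows cols : Nat) (d : PySem.Dict (Int × Int) Int)
    (r c v : Int) :
    pvSetCell (pvGridOf rows cols d) r c v = pvGridOf rows cols (d.insert (r, c) v) := by
  unfold pvSetCell
  by_cases hrc : 0 ≤ r ∧ 0 ≤ c
  · rw [if_pos hrc]
    apply List.ext_getElem
    · simp [List.length_modify, pvGridOf_length]
    · intro i hi1 hi2
      have hi : i < rows := by rw [List.length_modify, pvGridOf_length] at hi1; exact hi1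
      rw [List.getElem_modify]
      by_cases hir : r.toNat = i
      · rw [if_pos hir]
        apply List.ext_getElem
        · rw [List.length_set, pvGridOf_row_length, pvGridOf_row_length]
        · intro j hj1 hj2
          have hj : j < cols := by
            rw [List.length_set, pvGridOf_row_length] at hj1; exact hj1
          rw [List.getElem_set, pvGridOf_getElem rows cols d i j hi hj,
              pvGridOf_getElem rows cols (d.insert (r, c) v) i j hi hj,
              PySem.Dict.getD_insert]
          by_cases hjc : c.toNat = j
          · have hkey : ((i:Int), (j:Int)) = (r, c) := by
              refine Prod.ext ?_ ?_ <;> simp <;> omega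
            rw [if_pos hjc, if_pos hkey]
          · have hkey : ¬ ((i:Int), (j:Int)) = (r, c) := by
              intro hEq
              apply hjc
              have := congrArg Prod.snd hEq
              simp at this
              omega
            rw [if_neg hjc, if_neg hkey]
      · rw [if_neg hir]
        apply List.ext_getElem
        · rw [pvGridOf_row_length, pvGridOf_row_length]
        · intro j hj1 hj2
          have hj : j < cols := by rw [pvGridOf_row_length] at hj1; exact hj1
          have hkey : ¬ ((i:Int), (j:Int)) = (r, c) := by
            intro hEq
            apply hir
            have := congrArg Prod.fst hEq
            simp at this
            omega
          rw [pvGridOf_getElem rows cols d i j hi hj,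
              pvGridOf_getElem rows cols (d.insert (r, c) v) i j hi hj,
              PySem.Dict.getD_insert, if_neg hkey]
  · rw [if_neg hrc]
    apply List.ext_getElem
    · rw [pvGridOf_length, pvGridOf_length]
    · intro i hi1 hi2
      have hi : i < rows := by rw [pvGridOf_length] at hi1; exact hi1
      apply List.ext_getElem
      · rw [pvGridOf_row_length, pvGridOf_row_length]
      · intro j hj1 hj2
        have hj : j < cols := by rw [pvGridOf_row_length] at hj1; exact hj1
        have hkey : ¬ ((i:Int), (j:Int)) = (r, c) := by
          intro hEq
          apply hrc
          have h1 := congrArg Prod.fst hEq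
          have h2 := congrArg Prod.snd hEq
          simp at h1 h2
          omega
        rw [pvGridOf_getElem rows cols d i j hi hj,
            pvGridOf_getElem rows cols (d.insert (r, c) v) i j hi hj,
            PySem.Dict.getD_insert, if_neg hkey]

theorem pvApplyW_gridOf (s : List Int) (ps : List (Int × Int)) :
    ∀ (i : Int) (rows cols : Nat) (d : PySem.Dict (Int × Int) Int),
    pvApplyW s ps i (pvGridOf rows cols d) = pvGridOf rows cols (pvDictW s ps i d) := by
  induction ps with
  | nil => intro i rows cols d; simp [pvApplyW, pvDictW]
  | cons p ps ih =>
      intro i rows cols d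
      simp only [pvApplyW, pvDictW, pvSetCell_gridOf, ih]

-- the four straight runs as ranges
theorem pvSeg_right (n : Nat) (r c : Int) :
    pvSeg 0 1 n r c = (PySem.List.pyRange (c+1) (c+1+(n:Int)) 1).map (fun col => (r, col)) := by
  unfold pvSeg
  rw [PySem.List.pyRange_one]
  have hn : (c + 1 + (n:Int) - (c + 1)).toNat = n := by omega
  rw [hn, List.map_map]
  refine List.map_congr_left fun k _ => ?_
  simp [Prod.ext_iff]
  ring

theorem pvSeg_down (n : Nat) (r c : Int) :
    pvSeg 1 0 n r c = (PySem.List.pyRange (r+1) (r+1+(n:Int)) 1).map (fun row => (row, c)) := by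
  unfold pvSeg
  rw [PySem.List.pyRange_one]
  have hn : (r + 1 + (n:Int) - (r + 1)).toNat = n := by omega
  rw [hn, List.map_map]
  refine List.map_congr_left fun k _ => ?_
  simp [Prod.ext_iff]
  ring

theorem pvSeg_left (n : Nat) (r c : Int) :
    pvSeg 0 (-1) n r c = (PySem.List.pyRange (c-1) (c-1-(n:Int)) (-1)).map (fun col => (r, col)) := by
  unfold pvSeg
  rw [PySem.List.pyRange_neg_one]
  have hn : (c - 1 - (c - 1 - (n:Int))).toNat = n := by omega
  rw [hn, List.map_map]
  refine List.map_congr_left fun k _ => ?_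
  simp [Prod.ext_iff]
  ring

theorem pvSeg_up (n : Nat) (r c : Int) :
    pvSeg (-1) 0 n r c = (PySem.List.pyRange (r-1) (r-1-(n:Int)) (-1)).map (fun row => (row, c)) := by
  unfold pvSeg
  rw [PySem.List.pyRange_neg_one]
  have hn : (r - 1 - (r - 1 - (n:Int))).toNat = n := by omega
  rw [hn, List.map_map]
  refine List.map_congr_left fun k _ => ?_
  simp [Prod.ext_iff]
  ring

theorem pvPosB_step0 (h v : Int) (k : Nat) (r c : Int) (hh : 0 < h) :
    pvPosB h v (4*k) r c = pvSeg 0 1 h.toNat r c ++ pvPosB (h-1) v (4*k+1) r (c + h) := by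
  rw [pvPosB]
  have h2 : (4*k) % 2 = 0 := by omega
  have h4 : (4*k) % 4 = 0 := by omega
  simp only [h2, h4, ite_true, if_pos hh,
    show (PySem.List.pyGet? pvDeltas ((0:Nat):Int)).getD (0,0) = ((0:Int),(1:Int)) from rfl]
  norm_num

theorem pvPosB_stop0 (h v : Int) (k : Nat) (r c : Int) (hh : ¬ 0 < h) :
    pvPosB h v (4*k) r c = [] := by
  rw [pvPosB]
  have h2 : (4*k) % 2 = 0 := by omega
  simp only [h2, ite_true, if_neg hh]

theorem pvPosB_step1 (h v : Int) (k : Nat) (r c : Int) (hv : 0 < v) :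
    pvPosB h v (4*k+1) r c = pvSeg 1 0 v.toNat r c ++ pvPosB h (v-1) (4*k+2) (r + v) c := by
  rw [pvPosB]
  have h2 : (4*k+1) % 2 = 1 := by omega
  have h4 : (4*k+1) % 4 = 1 := by omega
  simp only [h2, h4, Nat.one_ne_zero, ite_false, if_pos hv,
    show (PySem.List.pyGet? pvDeltas ((1:Nat):Int)).getD (0,0) = ((1:Int),(0:Int)) from rfl]
  norm_num

theorem pvPosB_stop1 (h v : Int) (k : Nat) (r c : Int) (hv : ¬ 0 < v) :
    pvPosB h v (4*k+1) r c = [] := by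
  rw [pvPosB]
  have h2 : (4*k+1) % 2 = 1 := by omega
  simp only [h2, Nat.one_ne_zero, ite_false, if_neg hv]

theorem pvPosB_step2 (h v : Int) (k : Nat) (r c : Int) (hh : 0 < h) :
    pvPosB h v (4*k+2) r c = pvSeg 0 (-1) h.toNat r c ++ pvPosB (h-1) v (4*k+3) r (c - h) := by
  rw [pvPosB]
  have h2 : (4*k+2) % 2 = 0 := by omega
  have h4 : (4*k+2) % 4 = 2 := by omega
  simp only [h2, h4, ite_true, if_pos hh,
    show (PySem.List.pyGet? pvDeltas ((2:Nat):Int)).getD (0,0) = ((0:Int),(-1:Int)) from rfl]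
  norm_num
  ring_nf

theorem pvPosB_stop2 (h v : Int) (k : Nat) (r c : Int) (hh : ¬ 0 < h) :
    pvPosB h v (4*k+2) r c = [] := by
  rw [pvPosB]
  have h2 : (4*k+2) % 2 = 0 := by omega
  simp only [h2, ite_true, if_neg hh]

theorem pvPosB_step3 (h v : Int) (k : Nat) (r c : Int) (hv : 0 < v) :
    pvPosB h v (4*k+3) r c = pvSeg (-1) 0 v.toNat r c ++ pvPosB h (v-1) (4*(k+1)) (r - v) c := by
  rw [pvPosB]
  have h2 : (4*k+3) % 2 = 1 := by omega
  have h4 : (4*k+3) % 4 = 3 := by omega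
  simp only [h2, h4, Nat.one_ne_zero, ite_false, if_pos hv,
    show (PySem.List.pyGet? pvDeltas ((3:Nat):Int)).getD (0,0) = ((-1:Int),(0:Int)) from rfl]
  norm_num
  ring_nf

theorem pvPosB_stop3 (h v : Int) (k : Nat) (r c : Int) (hv : ¬ 0 < v) :
    pvPosB h v (4*k+3) r c = [] := by
  rw [pvPosB]
  have h2 : (4*k+3) % 2 = 1 := by omega
  simp only [h2, Nat.one_ne_zero, ite_false, if_neg hv]

-- the heart: A's ring-by-ring positions are B's run-by-run positions
theorem pvPosA_eq_posB_aux (n : Nat) : ∀ (t b l r : Int) (k : Nat),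
    ((b - t) + (r - l) + 2).toNat ≤ n → 0 ≤ b - t →
    pvPosA t b l r = pvPosB (r - l + 1) (b - t) (4*k) t (l - 1) := by
  induction n with
  | zero =>
      intro t b l r k hm hv
      rw [pvPosA, dif_neg (by omega), pvPosB_stop0 _ _ _ _ _ (by omega)]
  | succ n ih =>
      intro t b l r k hm hv
      by_cases hh : l ≤ r
      · rw [pvPosA, dif_pos ⟨by omega, hh⟩]
        dsimp only
        rw [pvPosB_step0 _ _ k _ _ (by omega), pvSeg_right]
        rw [show (l-1)+1+((((r - l + 1).toNat):Int)) = r+1 from by omega,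
            show (l-1)+1 = l from by ring,
            show (l-1) + (r - l + 1) = r from by ring]
        by_cases hv1 : 0 < b - t
        · rw [pvPosB_step1 _ _ k _ _ hv1, pvSeg_down]
          rw [show t+1+(((b - t).toNat):Int) = b+1 from by omega,
              show t + (b - t) = b from by ring]
          by_cases hh1 : 0 < r - l + 1 - 1
          · rw [pvPosB_step2 _ _ k _ _ hh1, pvSeg_left]
            rw [show r-1-(((r - l + 1 - 1).toNat):Int) = l-1 from by omega,
                show r - (r - l + 1 - 1) = l from by ring]
            rw [if_pos (by omega : t+1 ≤ b)]
            dsimp only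
            by_cases hv2 : 0 < b - t - 1
            · rw [pvPosB_step3 _ _ k _ _ hv2, pvSeg_up]
              rw [show b-1-(((b - t - 1).toNat):Int) = t from by omega,
                  show b - (b - t - 1) = t + 1 from by ring]
              rw [if_pos (by omega : l ≤ r-1)]
              dsimp only
              have hrec : pvPosA (t+1) (b-1) (l+1) (r-1) =
                  pvPosB (r - l + 1 - 1 - 1) (b - t - 1 - 1) (4*(k+1)) (t+1) l := by
                have h0 := ih (t+1) (b-1) (l+1) (r-1) (k+1) (by omega) (by omega)
                rw [show (r-1) - (l+1) + 1 = r - l + 1 - 1 - 1 from by ring,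
                    show (b-1) - (t+1) = b - t - 1 - 1 from by ring,
                    show (l+1) - 1 = l from by ring] at h0
                exact h0
              rw [hrec, show ((t+1)-1 : Int) = t from by ring]
              simp [List.append_assoc]
            · -- two-row ring: the up run is empty and both sides stop
              rw [pvPosB_stop3 _ _ k _ _ hv2]
              rw [if_pos (by omega : l ≤ r-1)]
              dsimp only
              rw [show ((t+1)-1) = t from by ring]
              rw [PySem.List.pyRange_neg_one_eq_nil (by omega : b - 1 ≤ t)]
              rw [pvPosA, dif_neg (by omega)]
              simp
          · -- single-column ring: the left run is empty and both sides stop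
            rw [pvPosB_stop2 _ _ k _ _ hh1]
            rw [if_pos (by omega : t+1 ≤ b)]
            dsimp only
            rw [PySem.List.pyRange_neg_one_eq_nil (by omega : r - 1 ≤ l - 1)]
            rw [if_neg (by omega : ¬ l ≤ r-1)]
            dsimp only
            rw [pvPosA, dif_neg (by omega)]
            simp
        · -- single-row ring: the down run is empty and both sides stop
          rw [pvPosB_stop1 _ _ k _ _ hv1]
          rw [PySem.List.pyRange_one_eq_nil (by omega : b + 1 ≤ t + 1)]
          rw [if_neg (by omega : ¬ t+1 ≤ b)]
          by_cases hlr : l ≤ r-1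
          · rw [if_pos hlr]
            dsimp only
            rw [show ((t+1)-1) = t from by ring]
            rw [PySem.List.pyRange_neg_one_eq_nil (by omega : b ≤ t)]
            rw [pvPosA, dif_neg (by omega)]
            simp
          · rw [if_neg hlr]
            dsimp only
            rw [pvPosA, dif_neg (by omega)]
            simp
      · rw [pvPosA, dif_neg (by omega), pvPosB_stop0 _ _ _ _ _ (by omega)]

theorem pvPosA_eq_posB (t b l r : Int) (k : Nat) (hv : 0 ≤ b - t) :
    pvPosA t b l r = pvPosB (r - l + 1) (b - t) (4*k) t (l - 1) :=
  pvPosA_eq_posB_aux ((b - t) + (r - l) + 2).toNat t b l r k le_rfl hv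

theorem pvInit_grid (rows cols : Nat) :
    (List.range rows).map (fun _ => List.replicate cols (0:Int)) =
      pvGridOf rows cols PySem.Dict.empty := by
  simp [pvGridOf, PySem.Dict.getD_empty, List.map_const']

-- ===== VERDICT (by name: the statement is the Claim_ definition above) =====
theorem unspiral_order_spec : Claim_equal_unspiral_order := by
  unfold Claim_equal_unspiral_order
  intro matrix spiral_order _ _
  unfold Spec_unspiral_order
  unfold unspiral_order unspiral_order_alt
  by_cases hm : matrix = []
  · simp [hm]
  · rw [if_neg hm, if_neg hm]
    dsimp only
    rw [pvLoopA_eq, pvInit_grid, pvApplyW_gridOf, pvLoopB_eq]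
    have hlen : 0 < matrix.length := List.length_pos_iff.mpr hm
    have hpos := pvPosA_eq_posB 0 ((matrix.length : Int) - 1) 0
      (((PySem.List.pyGetD matrix 0 []).length : Int) - 1) 0 (by omega)
    rw [show (((PySem.List.pyGetD matrix 0 []).length : Int) - 1) - 0 + 1 =
          ((PySem.List.pyGetD matrix 0 []).length : Int) from by ring,
        show ((matrix.length : Int) - 1) - 0 = (matrix.length : Int) - 1 from by ring,
        show (4*0 : Nat) = 0 from by norm_num,
        show ((0:Int) - 1) = -1 from by ring] at hpos
    rw [hpos]
    rfl
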